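-- pv_equiv track=rewrite | github.com/eehwan/Algorithm-solutions | Programmers/스택-큐/주식가격.py | solution
-- ===== SOURCE A (Python) =====
-- def solution(prices):
--     length = len(prices)
--     result=[0]*length
--     for i in range(length):
--         for j in range(i+1,length):
--             result[i]+=1
--             if prices[i]>prices[j]:
--                 break
--     return result
-- ===== SOURCE B (Python) =====
-- def solution(prices):
--     # Monotonic stack of pending indices: each index is resolved once, O(n).
--     n = len(prices)
--     result = [0] * n
--     stack = []
--     for j in range(n):
--         p = prices[j]
--         while stack and prices[stack[-1]] > p:
--             i = stack.pop()
--             result[i] = j - i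
--         stack.append(j)
--     for i in stack:
--         result[i] = n - 1 - i
--     return result
-- ===== Notes on version B (the rewrite author's own statement) =====
-- stated objective: faster
-- what changed: Replaced the nested per-index rescan with a single left-to-right pass over a monotonic stack of pending indices, resolving each index once when a strictly smaller price arrives and finishing the survivors at the end.
import Mathlib
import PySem

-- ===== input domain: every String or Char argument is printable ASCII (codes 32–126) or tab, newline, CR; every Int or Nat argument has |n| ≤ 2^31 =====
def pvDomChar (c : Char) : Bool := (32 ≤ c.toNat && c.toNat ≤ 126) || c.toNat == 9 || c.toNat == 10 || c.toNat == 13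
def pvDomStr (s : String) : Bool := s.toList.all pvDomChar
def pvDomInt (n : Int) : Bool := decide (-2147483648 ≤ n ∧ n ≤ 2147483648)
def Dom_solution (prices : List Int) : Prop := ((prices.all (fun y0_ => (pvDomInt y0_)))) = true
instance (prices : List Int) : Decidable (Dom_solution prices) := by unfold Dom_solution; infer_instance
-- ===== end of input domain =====

-- B replaces A's O(n^2) nested rescan by a single O(n) pass with a monotonic stack of
-- pending indices; each index is resolved exactly once when a strictly smaller price arrives.

-- ===== PORT A =====
-- inner 'for j in range(j, length): result[i]+=1; if prices[i]>prices[j]: break' as a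
-- counting recursion on j (the running count is returned and added to result[i]).
def innerA (prices : List Int) (pi : Int) (j n : Nat) : Int :=
  if j < n then
    if pi > prices.getD j 0 then 1 else 1 + innerA prices pi (j + 1) n
  else 0
termination_by n - j

def solution (prices : List Int) : List Int :=
  let length := prices.length
  (List.range length).foldl
    (fun result i =>
      result.set i (result.getD i 0 + innerA prices (prices.getD i 0) (i + 1) length))
    (List.replicate length 0)

-- ===== PORT B =====
-- 'while stack and prices[stack[-1]] > p: i = stack.pop(); result[i] = j - i'
-- (stack head = top of the Python stack).
def popLoop (prices : List Int) (j : Nat) (p : Int) (stack : List Nat) (result : List Int) :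
    List Nat × List Int :=
  match stack with
  | [] => ([], result)
  | i :: rest =>
    if prices.getD i 0 > p then
      popLoop prices j p rest (result.set i ((j : Int) - (i : Int)))
    else (i :: rest, result)

-- one iteration of 'for j in range(n)': pop the resolved indices, then push j
def stepB (prices : List Int) (st : List Nat × List Int) (j : Nat) : List Nat × List Int :=
  let r := popLoop prices j (prices.getD j 0) st.1 st.2
  (j :: r.1, r.2)

def solution_alt (prices : List Int) : List Int :=
  let n := prices.length
  let st := (List.range n).foldl (stepB prices) ([], List.replicate n (0 : Int))
  st.1.foldl (fun result i => result.set i ((n : Int) - 1 - (i : Int))) st.2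

-- ===== PRECONDITION & SPEC =====
def Spec_solution (prices : List Int) (out : List Int) : Prop := out = solution_alt prices
instance (prices : List Int) (out : List Int) : Decidable (Spec_solution prices out) := by unfold Spec_solution; infer_instance

-- ===== CLAIM (what is proved, stated in full; the proofs are below) =====
def Claim_equal_solution : Prop := ∀ (prices : List Int), Dom_solution prices → Spec_solution prices (solution prices)

-- ===== LEMMAS AND PROOFS =====

-- first index k with i < k < j and prices[k] < prices[i]
def nlb (prices : List Int) (i j : Nat) : Option Nat :=
  (List.range' (i + 1) (j - (i + 1))).find?
    (fun k => decide (prices.getD k 0 < prices.getD i 0))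

lemma getD_set (l : List Int) (k : Nat) (v : Int) (i : Nat) :
    (l.set k v).getD i 0 = if k = i ∧ k < l.length then v else l.getD i 0 := by
  simp only [List.getD_eq_getElem?_getD, List.getElem?_set]
  split_ifs with h h1 h2 h3 <;> first | rfl | omega | simp_all

lemma innerA_eq (prices : List Int) (pi : Int) (j n : Nat) (h : j ≤ n) :
    innerA prices pi j n =
      match (List.range' j (n - j)).find? (fun k => decide (prices.getD k 0 < pi)) with
      | some k => (k : Int) + 1 - j
      | none => (n : Int) - j := by
  induction hd : n - j generalizing j with
  | zero =>
    have hj : j = n := by omega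
    subst hj
    rw [innerA]
    simp
  | succ d ih =>
    have hj : j < n := by omega
    rw [innerA]
    rw [show List.range' j (d + 1) = j :: List.range' (j + 1) d from List.range'_succ]
    by_cases hp : prices.getD j 0 < pi
    · rw [List.find?_cons_of_pos (by simpa using hp), if_pos hj, if_pos hp]
      show (1 : Int) = (j : Int) + 1 - (j : Int)
      omega
    · rw [List.find?_cons_of_neg (by simpa using hp), if_pos hj, if_neg hp]
      have hih := ih (j + 1) (by omega) (by omega)
      rw [hih]
      cases hf : (List.range' (j + 1) d).find? (fun k => decide (prices.getD k 0 < pi)) with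
      | none =>
        show (1 : Int) + ((n : Int) - ((j + 1 : Nat) : Int)) = (n : Int) - (j : Int)
        push_cast
        ring
      | some k =>
        show (1 : Int) + ((k : Int) + 1 - ((j + 1 : Nat) : Int)) = (k : Int) + 1 - (j : Int)
        push_cast
        ring

-- A's outer loop: after folding range m, entry i holds innerA for i < m, else still 0
lemma A_fold (prices : List Int) (m : Nat) (hm : m ≤ prices.length) :
    ((List.range m).foldl
      (fun result i =>
        result.set i (result.getD i 0 + innerA prices (prices.getD i 0) (i + 1) prices.length))
      (List.replicate prices.length 0)).length = prices.length ∧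
    ∀ i, ((List.range m).foldl
      (fun result i =>
        result.set i (result.getD i 0 + innerA prices (prices.getD i 0) (i + 1) prices.length))
      (List.replicate prices.length 0)).getD i 0 =
      if i < m then innerA prices (prices.getD i 0) (i + 1) prices.length else 0 := by
  induction m with
  | zero =>
    refine ⟨by simp, fun i => ?_⟩
    simp only [List.range_zero, List.foldl_nil, List.getD_eq_getElem?_getD,
      List.getElem?_replicate, Nat.not_lt_zero, if_false]
    split_ifs <;> rfl
  | succ m ih =>
    obtain ⟨hlen, hval⟩ := ih (by omega)
    rw [List.range_succ, List.foldl_append]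
    simp only [List.foldl_cons, List.foldl_nil]
    refine ⟨by rw [List.length_set]; exact hlen, fun i => ?_⟩
    rw [getD_set, hval m, hval i, hlen]
    by_cases him : m = i
    · subst him
      rw [if_pos ⟨rfl, by omega⟩, if_neg (lt_irrefl m), if_pos (by omega)]
      ring
    · rw [if_neg (fun hc => him hc.1)]
      by_cases hi : i < m
      · rw [if_pos hi, if_pos (by omega)]
      · rw [if_neg hi, if_neg (by omega)]

-- the stack relation: indices increase and prices do not decrease towards the top (head)
def SRel (prices : List Int) (a b : Nat) : Prop :=
  b < a ∧ prices.getD b 0 ≤ prices.getD a 0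

lemma popLoop_spec (prices : List Int) (j : Nat) (p : Int) :
    ∀ (stack : List Nat) (result : List Int),
      List.Pairwise (SRel prices) stack →
      (∀ i ∈ stack, i < result.length) →
      List.Pairwise (SRel prices) (popLoop prices j p stack result).1 ∧
      (∀ i, i ∈ (popLoop prices j p stack result).1 ↔
        i ∈ stack ∧ ¬ (p < prices.getD i 0)) ∧
      (popLoop prices j p stack result).2.length = result.length ∧
      (∀ i, (popLoop prices j p stack result).2.getD i 0 =
        if i ∈ stack ∧ p < prices.getD i 0 then (j : Int) - i else result.getD i 0) := by
  intro stack
  induction stack with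
  | nil => intro result _ _; simp [popLoop]
  | cons a rest ih =>
    intro result hpw hlt
    rw [popLoop]
    by_cases hp : p < prices.getD a 0
    · rw [if_pos hp]
      have hanr : a ∉ rest := fun hmem => by
        have := (List.pairwise_cons.mp hpw).1 a hmem
        exact absurd this.1 (lt_irrefl a)
      obtain ⟨h1, h2, h3, h4⟩ := ih (result.set a ((j : Int) - a))
        (List.pairwise_cons.mp hpw).2
        (fun i hi => by rw [List.length_set]; exact hlt i (List.mem_cons_of_mem _ hi))
      refine ⟨h1, fun i => ?_, by rw [h3, List.length_set], fun i => ?_⟩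
      · rw [h2 i]
        constructor
        · rintro ⟨hi, hni⟩; exact ⟨List.mem_cons_of_mem _ hi, hni⟩
        · rintro ⟨hi, hni⟩
          rcases List.mem_cons.mp hi with rfl | hi
          · exact absurd hp hni
          · exact ⟨hi, hni⟩
      · rw [h4 i, getD_set]
        by_cases hir : i ∈ rest ∧ p < prices.getD i 0
        · rw [if_pos hir, if_pos ⟨List.mem_cons_of_mem _ hir.1, hir.2⟩]
        · rw [if_neg hir]
          by_cases hia : a = i
          · subst hia
            rw [if_pos ⟨rfl, hlt a (List.mem_cons_self)⟩,
              if_pos ⟨List.mem_cons_self, hp⟩]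
          · have hrhs : ¬ (i ∈ a :: rest ∧ p < prices.getD i 0) := by
              rintro ⟨hi, hpi⟩
              rcases List.mem_cons.mp hi with rfl | hi2
              · exact hia rfl
              · exact hir ⟨hi2, hpi⟩
            rw [if_neg (fun hc => hia hc.1), if_neg hrhs]
    · rw [if_neg hp]
      have hall : ∀ i ∈ a :: rest, ¬ (p < prices.getD i 0) := by
        intro i hi
        rcases List.mem_cons.mp hi with rfl | hi
        · exact hp
        · have := (List.pairwise_cons.mp hpw).1 i hi
          intro hc
          exact hp (lt_of_lt_of_le hc this.2)
      refine ⟨hpw, fun i => ⟨fun hi => ⟨hi, hall i hi⟩, fun hi => hi.1⟩, rfl, fun i => ?_⟩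
      rw [if_neg]
      rintro ⟨hi, hpi⟩
      exact hall i hi hpi

lemma nlb_ge (prices : List Int) (i j : Nat) (h : j ≤ i + 1) : nlb prices i j = none := by
  unfold nlb
  rw [show j - (i + 1) = 0 by omega]
  simp

lemma nlb_step (prices : List Int) (i j : Nat) (h : i < j) :
    nlb prices i (j + 1) =
      (nlb prices i j).or
        (if prices.getD j 0 < prices.getD i 0 then some j else none) := by
  unfold nlb
  rw [show j + 1 - (i + 1) = (j - (i + 1)) + 1 by omega, List.range'_concat,
    List.find?_append]
  congr 1
  rw [show i + 1 + 1 * (j - (i + 1)) = j by omega]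
  by_cases hp : prices.getD j 0 < prices.getD i 0
  · rw [List.find?_cons_of_pos (by simpa using hp), if_pos hp]
  · rw [List.find?_cons_of_neg (by simpa using hp), if_neg hp]
    simp

-- the loop invariant for B's main pass, after processing prefix range j
def InvB (prices : List Int) (j : Nat) (st : List Nat × List Int) : Prop :=
  st.2.length = prices.length ∧
  List.Pairwise (SRel prices) st.1 ∧
  (∀ i, i ∈ st.1 ↔ (i < j ∧ nlb prices i j = none)) ∧
  (∀ i, st.2.getD i 0 =
    match nlb prices i j with
    | some k => (k : Int) - i
    | none => 0)

lemma invB_step (prices : List Int) (j : Nat) (st : List Nat × List Int)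
    (hj : j < prices.length) (hinv : InvB prices j st) :
    InvB prices (j + 1) (stepB prices st j) := by
  obtain ⟨hlen, hpw, hmem, hval⟩ := hinv
  have hbound : ∀ i ∈ st.1, i < st.2.length := fun i hi => by
    rw [hlen]; exact lt_trans ((hmem i).mp hi).1 hj
  obtain ⟨h1, h2, h3, h4⟩ := popLoop_spec prices j (prices.getD j 0) st.1 st.2 hpw hbound
  set r := popLoop prices j (prices.getD j 0) st.1 st.2 with hr
  refine ⟨by simpa [stepB, ← hr] using h3.trans hlen, ?_, ?_, ?_⟩
  · -- pairwise of j :: r.1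
    show List.Pairwise (SRel prices) (j :: r.1)
    rw [List.pairwise_cons]
    refine ⟨fun b hb => ?_, h1⟩
    have hb2 := (h2 b).mp hb
    exact ⟨((hmem b).mp hb2.1).1, not_lt.mp hb2.2⟩
  · -- membership characterisation at j + 1
    intro i
    show i ∈ j :: r.1 ↔ _
    rw [List.mem_cons, h2 i, hmem i]
    constructor
    · rintro (rfl | ⟨⟨hij, hnone⟩, hnp⟩)
      · exact ⟨by omega, nlb_ge prices i (i + 1) (le_refl _)⟩
      · refine ⟨by omega, ?_⟩
        rw [nlb_step prices i j hij, hnone, if_neg (fun hc => hnp hc)]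
        rfl
    · rintro ⟨hij, hnone⟩
      by_cases hij' : i = j
      · exact Or.inl hij'
      · have hlt : i < j := by omega
        rw [nlb_step prices i j hlt] at hnone
        rcases Option.or_eq_none_iff.mp hnone with ⟨hn1, hn2⟩
        refine Or.inr ⟨⟨hlt, hn1⟩, fun hc => ?_⟩
        rw [if_pos hc] at hn2
        simp at hn2
  · -- value characterisation at j + 1
    intro i
    show r.2.getD i 0 = _
    rw [h4 i, hval i]
    by_cases hcase : i ∈ st.1 ∧ prices.getD j 0 < prices.getD i 0
    · rw [if_pos hcase]
      have ⟨hij, hnone⟩ := (hmem i).mp hcase.1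
      rw [nlb_step prices i j hij, hnone, if_pos hcase.2]
      rfl
    · rw [if_neg hcase]
      by_cases hij : i < j
      · by_cases hmemi : i ∈ st.1
        · have hnone := ((hmem i).mp hmemi).2
          have hnp : ¬ prices.getD j 0 < prices.getD i 0 := fun hc => hcase ⟨hmemi, hc⟩
          rw [nlb_step prices i j hij, hnone, if_neg hnp]
          rfl
        · cases hn : nlb prices i j with
          | none => exact absurd ((hmem i).mpr ⟨hij, hn⟩) hmemi
          | some k => rw [nlb_step prices i j hij, hn]; rfl
      · rw [nlb_ge prices i j (by omega), nlb_ge prices i (j + 1) (by omega)]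

lemma invB_fold (prices : List Int) (m : Nat) (hm : m ≤ prices.length) :
    InvB prices m
      ((List.range m).foldl (stepB prices) ([], List.replicate prices.length (0 : Int))) := by
  induction m with
  | zero =>
    refine ⟨by simp, by simp, fun i => by simp [nlb_ge prices i 0 (by omega)], fun i => ?_⟩
    rw [nlb_ge prices i 0 (by omega)]
    simp [List.getD_eq_getElem?_getD, List.getElem?_replicate]
    split_ifs <;> rfl
  | succ m ih =>
    rw [List.range_succ, List.foldl_append, List.foldl_cons, List.foldl_nil]
    exact invB_step prices m _ (by omega) (ih (by omega))

-- the final pass over the surviving stack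
lemma final_fold (prices : List Int) (v : Int) :
    ∀ (stack : List Nat) (result : List Int),
      List.Pairwise (SRel prices) stack →
      (∀ i ∈ stack, i < result.length) →
      (stack.foldl (fun result i => result.set i (v - (i : Int))) result).length =
        result.length ∧
      ∀ i, (stack.foldl (fun result i => result.set i (v - (i : Int))) result).getD i 0 =
        if i ∈ stack then v - (i : Int) else result.getD i 0 := by
  intro stack
  induction stack with
  | nil => intro result _ _; simp
  | cons a rest ih =>
    intro result hpw hlt
    have hanr : a ∉ rest := fun hmem => by
      have := (List.pairwise_cons.mp hpw).1 a hmem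
      exact absurd this.1 (lt_irrefl a)
    obtain ⟨hl, hv⟩ := ih (result.set a (v - a)) (List.pairwise_cons.mp hpw).2
      (fun i hi => by rw [List.length_set]; exact hlt i (List.mem_cons_of_mem _ hi))
    rw [List.foldl_cons]
    refine ⟨by rw [hl, List.length_set], fun i => ?_⟩
    rw [hv i, getD_set]
    by_cases hir : i ∈ rest
    · rw [if_pos hir, if_pos (List.mem_cons_of_mem _ hir)]
    · rw [if_neg hir]
      by_cases hia : a = i
      · subst hia
        rw [if_pos ⟨rfl, hlt a List.mem_cons_self⟩, if_pos List.mem_cons_self]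
      · rw [if_neg (fun hc => hia hc.1), if_neg (by
          simp only [List.mem_cons]
          rintro (rfl | h)
          · exact hia rfl
          · exact hir h)]

-- B's output, entrywise
lemma B_getD (prices : List Int) :
    (solution_alt prices).length = prices.length ∧
    ∀ i, i < prices.length →
      (solution_alt prices).getD i 0 =
        match nlb prices i prices.length with
        | some k => (k : Int) - i
        | none => (prices.length : Int) - 1 - i := by
  have hinv := invB_fold prices prices.length (le_refl _)
  obtain ⟨hlen, hpw, hmem, hval⟩ := hinv
  set st := (List.range prices.length).foldl (stepB prices)
    ([], List.replicate prices.length (0 : Int)) with hst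
  have hbound : ∀ i ∈ st.1, i < st.2.length := fun i hi => by
    rw [hlen]; exact ((hmem i).mp hi).1
  obtain ⟨hfl, hfv⟩ :=
    final_fold prices ((prices.length : Int) - 1) st.1 st.2 hpw hbound
  have heq : solution_alt prices =
      st.1.foldl (fun result i =>
        result.set i ((prices.length : Int) - 1 - (i : Int))) st.2 := by
    simp only [solution_alt, ← hst]
  constructor
  · rw [heq, hfl, hlen]
  · intro i hi
    rw [heq, hfv i]
    by_cases hmemi : i ∈ st.1
    · rw [if_pos hmemi, ((hmem i).mp hmemi).2]
    · rw [if_neg hmemi, hval i]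
      cases hn : nlb prices i prices.length with
      | none => exact absurd ((hmem i).mpr ⟨hi, hn⟩) hmemi
      | some k => rfl

-- A's output, entrywise
lemma A_getD (prices : List Int) :
    (solution prices).length = prices.length ∧
    ∀ i, i < prices.length →
      (solution prices).getD i 0 =
        match nlb prices i prices.length with
        | some k => (k : Int) - i
        | none => (prices.length : Int) - 1 - i := by
  obtain ⟨hlen, hval⟩ := A_fold prices prices.length (le_refl _)
  refine ⟨hlen, fun i hi => ?_⟩
  have : (solution prices).getD i 0 =
      innerA prices (prices.getD i 0) (i + 1) prices.length := by
    simpa [solution, if_pos hi] using hval i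
  rw [this, innerA_eq prices (prices.getD i 0) (i + 1) prices.length (by omega)]
  unfold nlb
  cases hf : (List.range' (i + 1) (prices.length - (i + 1))).find?
      (fun k => decide (prices.getD k 0 < prices.getD i 0)) with
  | none =>
    show (prices.length : Int) - ((i + 1 : Nat) : Int) = (prices.length : Int) - 1 - (i : Int)
    push_cast
    ring
  | some k =>
    show (k : Int) + 1 - ((i + 1 : Nat) : Int) = (k : Int) - (i : Int)
    push_cast
    ring

-- ===== VERDICT (by name: the statement is the Claim_ definition above) =====
theorem solution_spec : Claim_equal_solution := by
  intro prices _
  unfold Spec_solution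
  obtain ⟨hal, hav⟩ := A_getD prices
  obtain ⟨hbl, hbv⟩ := B_getD prices
  apply List.ext_getElem (by rw [hal, hbl])
  intro i h1 h2
  have hi : i < prices.length := by rwa [hal] at h1
  have ha : (solution prices)[i] = (solution prices).getD i 0 := by
    rw [List.getD_eq_getElem?_getD, List.getElem?_eq_getElem h1]; rfl
  have hb : (solution_alt prices)[i] = (solution_alt prices).getD i 0 := by
    rw [List.getD_eq_getElem?_getD, List.getElem?_eq_getElem h2]; rfl
  rw [ha, hb, hav i hi, hbv i hi]
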